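-- pv_equiv track=rewrite | github.com/castellanos-dev/pydev-ai | src/tools/rag_tools.py | _split_heading_chunks
-- ===== SOURCE A (Python) =====
-- from typing import Iterable, List, Dict, Any, Optional, Union
--
-- def _split_heading_chunks(text: str, max_chars: int = 1200, overlap: int = 150) -> List[Dict[str, Any]]:
--     """
--     Split documentation text into chunks, preferring to start chunks at markdown-like headings.
--     Returns a list of {"heading": str, "text": str}.
--     """
--     if not text:
--         return []
--     lines = text.splitlines()
--     chunks: List[Dict[str, Any]] = []
--
--     def flush(buffer: List[str], heading: str) -> None:
--         if not buffer:
--             return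
--         buf_text = "\n".join(buffer).strip()
--         if buf_text:
--             chunks.append({"heading": heading.strip()[:200], "text": buf_text})
--
--     current: List[str] = []
--     current_len = 0
--     current_heading = ""
--
--     for ln in lines:
--         is_heading = ln.lstrip().startswith("#") and ln.strip().startswith("#")
--         if is_heading:
--             # Start a new chunk at heading boundary
--             if current:
--                 flush(current, current_heading)
--             current = []
--             current_len = 0
--             # Extract heading title after leading #'s
--             title = ln.lstrip().lstrip('#').strip()
--             current_heading = title or current_heading
--             continue
--         # Append line; if exceeds max, flush with overlap
--         current.append(ln)
--         current_len += len(ln) + 1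
--         if current_len >= max_chars:
--             flush(current, current_heading)
--             if overlap > 0 and len(current) > 1:
--                 # Keep tail lines as overlap
--                 tail_text = "\n".join(current).strip()
--                 if len(tail_text) > overlap:
--                     # heuristic: keep last ~overlap chars by lines
--                     tail = []
--                     acc = 0
--                     for l in reversed(current):
--                         acc += len(l) + 1
--                         tail.append(l)
--                         if acc >= overlap:
--                             break
--                     current = list(reversed(tail))
--                 else:
--                     current = current[-max(1, int(len(current) * 0.25)) :]
--             else:
--                 current = []
--             current_len = sum(len(l) + 1 for l in current)
--
--     flush(current, current_heading)
--     if not chunks: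
--         return [{"heading": "", "text": text}]
--     return chunks
-- ===== SOURCE B (Python) =====
-- from typing import List, Dict, Any
--
--
-- def _emit(out: List[Dict[str, Any]], buf_lines: List[str], heading: str) -> None:
--     text = "\n".join(buf_lines).strip()
--     if text:
--         out.append({"heading": heading.strip()[:200], "text": text})
--
--
-- def _tail_start(P, s, e, overlap):
--     # largest j in [s, e-1] with P[e] - P[j] >= overlap, or s if there is none
--     if P[e] - P[e - 1] >= overlap:
--         return e - 1
--     if P[e] - P[s] < overlap:
--         return s
--     lo, hi = s, e - 1          # invariant: cond(lo) holds, cond(hi) fails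
--     while hi - lo > 1:
--         mid = (lo + hi) // 2
--         if P[e] - P[mid] >= overlap:
--             lo = mid
--         else:
--             hi = mid
--     return lo
--
--
-- def _chunk_section(out, lines, heading, max_chars, overlap):
--     # Index-based chunker: prefix sums + slice arithmetic, no buffer mutation.
--     n = len(lines)
--     P = [0]
--     for ln in lines:
--         P.append(P[-1] + len(ln) + 1)
--     s = 0
--     for e in range(1, n + 1):
--         if P[e] - P[s] >= max_chars:
--             _emit(out, lines[s:e], heading)
--             if overlap > 0 and e - s > 1:
--                 if len("\n".join(lines[s:e]).strip()) > overlap: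
--                     s = _tail_start(P, s, e, overlap)   # binary search for the overlap start
--                 else:
--                     s = e - max(1, (e - s) // 4)
--             else:
--                 s = e
--     _emit(out, lines[s:n], heading)
--
--
-- def _split_heading_chunks(text: str, max_chars: int = 1200, overlap: int = 150) -> List[Dict[str, Any]]:
--     if not text:
--         return []
--     # Pass 1: split the lines into heading-delimited sections, carrying headings forward.
--     sections = []
--     heading = ""
--     cur: List[str] = []
--     for ln in text.splitlines():
--         if ln.lstrip().startswith("#") and ln.strip().startswith("#"):
--             sections.append((heading, cur))
--             title = ln.lstrip().lstrip('#').strip()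
--             heading = title or heading
--             cur = []
--         else:
--             cur.append(ln)
--     sections.append((heading, cur))
--     # Pass 2: chunk each section by index arithmetic over its prefix-sum table.
--     chunks: List[Dict[str, Any]] = []
--     for h, sec in sections:
--         _chunk_section(chunks, sec, h, max_chars, overlap)
--     if not chunks:
--         return [{"heading": "", "text": text}]
--     return chunks
-- ===== Notes on version B (the rewrite author's own statement) =====
-- stated objective: alternative
-- what changed: A's single interleaved loop that mutates a line buffer (with a reversed linear rescan to find the overlap tail and a recomputed running length) is replaced by two staged passes: heading-aligned sectioning, then index-based chunking over a prefix-sum table where every chunk is a slice lines[s:e] and the overlap start index is found by binary search on the prefix sums.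
import Mathlib
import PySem

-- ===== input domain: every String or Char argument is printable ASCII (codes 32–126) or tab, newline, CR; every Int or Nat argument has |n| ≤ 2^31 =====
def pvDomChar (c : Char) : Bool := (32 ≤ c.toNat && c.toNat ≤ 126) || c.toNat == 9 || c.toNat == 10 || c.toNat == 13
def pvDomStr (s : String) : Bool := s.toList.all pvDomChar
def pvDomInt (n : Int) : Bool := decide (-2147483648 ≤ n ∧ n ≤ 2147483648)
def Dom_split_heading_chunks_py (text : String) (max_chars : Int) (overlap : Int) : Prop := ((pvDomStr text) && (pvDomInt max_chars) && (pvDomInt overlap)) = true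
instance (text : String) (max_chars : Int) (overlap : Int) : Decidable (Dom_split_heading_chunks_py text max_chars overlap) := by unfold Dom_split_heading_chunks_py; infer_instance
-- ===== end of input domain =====

-- B replaces A's single interleaved buffer-mutating loop (reversed linear rescan for the overlap
-- tail, recomputed running length) by two staged passes: heading-aligned sectioning, then
-- index-based chunking over a prefix-sum table with a binary search for the overlap start
-- (objective: alternative).

-- s.lstrip('#') has no PySem primitive; ported by hand as dropWhile '#' (exact: lstrip('#')
-- removes exactly the leading '#' characters). Used by both ports (both Pythons call it).
def pyLstripHash (s : String) : String := String.ofList (s.toList.dropWhile (fun c => c == '#'))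

-- ===== PORT A =====
-- the local 'flush' closure of A (appending to 'chunks' instead of mutating it)
def flushA (chunks : List (List (String × String))) (buffer : List String) (heading : String) : List (List (String × String)) :=
  if buffer.isEmpty then chunks
  else
    let buf_text := PySem.Str.strip (PySem.Str.join "\n" buffer)
    if buf_text = "" then chunks
    else chunks ++ [[("heading", PySem.Str.slice (PySem.Str.strip heading) none (some 200)), ("text", buf_text)]]

-- 'for l in reversed(current): … if acc >= overlap: break' (tail accumulated by append, as in A)
def aTailLoop (overlap : Int) : List String → Int → List String → List String
  | [], _, tail => tail
  | l :: rest, acc, tail =>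
      let acc2 := acc + PySem.Str.len l + 1
      let tail2 := tail ++ [l]
      if acc2 ≥ overlap then tail2 else aTailLoop overlap rest acc2 tail2

-- one iteration of A's 'for ln in lines' over state (chunks, current, current_len, current_heading)
def aStep (max_chars overlap : Int) (st : List (List (String × String)) × List String × Int × String) (ln : String) : List (List (String × String)) × List String × Int × String :=
  if PySem.Str.startswith (PySem.Str.lstrip ln) "#" && PySem.Str.startswith (PySem.Str.strip ln) "#" then
    let chunks2 := if st.2.1.isEmpty then st.1 else flushA st.1 st.2.1 st.2.2.2
    let title := PySem.Str.strip (pyLstripHash (PySem.Str.lstrip ln))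
    (chunks2, [], 0, if title = "" then st.2.2.2 else title)
  else
    let current2 := st.2.1 ++ [ln]
    let len2 := st.2.2.1 + PySem.Str.len ln + 1
    if len2 ≥ max_chars then
      let chunks2 := flushA st.1 current2 st.2.2.2
      let current3 :=
        if overlap > 0 ∧ 1 < current2.length then
          let tail_text := PySem.Str.strip (PySem.Str.join "\n" current2)
          if PySem.Str.len tail_text > overlap then
            (aTailLoop overlap current2.reverse 0 []).reverse
          else
            -- current2[-max(1, int(len(current2)*0.25)):]  (int(n*0.25) = n / 4 exactly: *0.25 is exact below 2^53)
            PySem.List.slice current2 (some (-((max 1 (current2.length / 4) : Nat) : Int))) none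
        else []
      (chunks2, current3, (current3.map (fun l => PySem.Str.len l + 1)).sum, st.2.2.2)
    else (st.1, current2, len2, st.2.2.2)

def split_heading_chunks_py (text : String) (max_chars : Int) (overlap : Int) : List (List (String × String)) :=
  if text = "" then []
  else
    let st := (PySem.Str.splitlines text).foldl (aStep max_chars overlap) ([], [], 0, "")
    let chunks := flushA st.1 st.2.1 st.2.2.2
    if chunks.isEmpty then [[("heading", ""), ("text", text)]] else chunks

-- ===== PORT B =====
def bIsHeading (ln : String) : Bool :=
  PySem.Str.startswith (PySem.Str.lstrip ln) "#" && PySem.Str.startswith (PySem.Str.strip ln) "#"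

-- '_emit': emit join(buf).strip() if non-empty (no explicit empty-buffer branch, unlike A's flush)
def bEmit (out : List (List (String × String))) (buf : List String) (heading : String) : List (List (String × String)) :=
  let t := PySem.Str.strip (PySem.Str.join "\n" buf)
  if t = "" then out
  else out ++ [[("heading", PySem.Str.slice (PySem.Str.strip heading) none (some 200)), ("text", t)]]

-- pass 1: one iteration over (sections, heading, cur)
def bSegStep (st : List (String × List String) × String × List String) (ln : String) : List (String × List String) × String × List String :=
  if bIsHeading ln then
    let title := PySem.Str.strip (pyLstripHash (PySem.Str.lstrip ln))
    (st.1 ++ [(st.2.1, st.2.2)], if title = "" then st.2.1 else title, [])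
  else (st.1, st.2.1, st.2.2 ++ [ln])

-- 'P = [0]; for ln in lines: P.append(P[-1] + len(ln) + 1)'
def bPrefix (lines : List String) : List Int :=
  lines.foldl (fun P ln => P ++ [PySem.List.pyGetD P (-1) 0 + PySem.Str.len ln + 1]) [0]

-- the 'while hi - lo > 1' binary-search loop of _tail_start; the interval width hi - lo strictly
-- shrinks every iteration, so it is transcribed with fuel hi - lo (a totality device only)
def bSearchGo (P : List Int) (e : Nat) (ov : Int) : Nat → Nat → Nat → Nat
  | 0, lo, _ => lo
  | fuel + 1, lo, hi =>
      if hi - lo > 1 then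
        let mid := (lo + hi) / 2
        if PySem.List.pyGetD P (e : Int) 0 - PySem.List.pyGetD P (mid : Int) 0 ≥ ov then bSearchGo P e ov fuel mid hi
        else bSearchGo P e ov fuel lo mid
      else lo

def bSearch (P : List Int) (e : Nat) (ov : Int) (lo hi : Nat) : Nat :=
  bSearchGo P e ov (hi - lo) lo hi

-- '_tail_start': largest j in [s, e-1] with P[e] - P[j] >= overlap, or s if none
def bTailStart (P : List Int) (s e : Nat) (ov : Int) : Nat :=
  if PySem.List.pyGetD P (e : Int) 0 - PySem.List.pyGetD P ((e - 1 : Nat) : Int) 0 ≥ ov then e - 1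
  else if PySem.List.pyGetD P (e : Int) 0 - PySem.List.pyGetD P (s : Int) 0 < ov then s
  else bSearch P e ov s (e - 1)

-- pass 2, '_chunk_section': one iteration of 'for e in range(1, n+1)' over (out, s)
-- (the start index s satisfies 0 ≤ s ≤ e at every check, so it is carried as a Nat)
def bChunkStep2 (mc ov : Int) (lines : List String) (P : List Int) (h : String) (st : List (List (String × String)) × Nat) (e : Nat) : List (List (String × String)) × Nat :=
  if PySem.List.pyGetD P (e : Int) 0 - PySem.List.pyGetD P (st.2 : Int) 0 ≥ mc then
    let out := bEmit st.1 (PySem.List.slice lines (some (st.2 : Int)) (some (e : Int))) h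
    let s' :=
      if ov > 0 ∧ e - st.2 > 1 then
        if PySem.Str.len (PySem.Str.strip (PySem.Str.join "\n" (PySem.List.slice lines (some (st.2 : Int)) (some (e : Int))))) > ov then
          bTailStart P st.2 e ov
        else e - max 1 ((e - st.2) / 4)
      else e
    (out, s')
  else st

def bChunkSection (mc ov : Int) (out0 : List (List (String × String))) (lines : List String) (h : String) : List (List (String × String)) :=
  let P := bPrefix lines
  let st := (List.range' 1 lines.length).foldl (bChunkStep2 mc ov lines P h) (out0, 0)
  bEmit st.1 (PySem.List.slice lines (some (st.2 : Int)) (some (lines.length : Int))) h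

def split_heading_chunks_py_alt (text : String) (max_chars : Int) (overlap : Int) : List (List (String × String)) :=
  if text = "" then []
  else
    let st := (PySem.Str.splitlines text).foldl bSegStep ([], "", [])
    let sections := st.1 ++ [(st.2.1, st.2.2)]
    let chunks := sections.foldl (fun acc (hs : String × List String) => bChunkSection max_chars overlap acc hs.2 hs.1) []
    if chunks.isEmpty then [[("heading", ""), ("text", text)]] else chunks

-- ===== PRECONDITION & SPEC =====
-- (no Pre_: the Python A returns normally on every input)
def Spec_split_heading_chunks_py (text : String) (max_chars : Int) (overlap : Int) (out : List (List (String × String))) : Prop := out = split_heading_chunks_py_alt text max_chars overlap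
instance (text : String) (max_chars : Int) (overlap : Int) (out : List (List (String × String))) : Decidable (Spec_split_heading_chunks_py text max_chars overlap out) := by unfold Spec_split_heading_chunks_py; infer_instance

-- ===== CLAIM (what is proved, stated in full; the proofs are below) =====
def Claim_equal_split_heading_chunks_py : Prop := ∀ (text : String) (max_chars : Int) (overlap : Int), Dom_split_heading_chunks_py text max_chars overlap → Spec_split_heading_chunks_py text max_chars overlap (split_heading_chunks_py text max_chars overlap)

-- ===== LEMMAS AND PROOFS =====

-- ---- A-side characterisation (per-line chunker), reused machinery ----

-- the carried-heading rule (proof-side name for the expression inlined in both ports)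
def bTitleOf (heading : String) (ln : String) : String :=
  let title := PySem.Str.strip (pyLstripHash (PySem.Str.lstrip ln))
  if title = "" then heading else title

def fTail (ov : Int) : List String → Int → List String
  | [], _ => []
  | l :: rest, acc =>
      let acc2 := acc + PySem.Str.len l + 1
      l :: (if acc2 ≥ ov then [] else fTail ov rest acc2)

theorem aTailLoop_eq (ov : Int) : ∀ (r : List String) (acc : Int) (t : List String), aTailLoop ov r acc t = t ++ fTail ov r acc := by
  intro r
  induction r with
  | nil => intro acc t; simp [aTailLoop, fTail]
  | cons l rest ih =>
      intro acc t
      simp only [aTailLoop, fTail]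
      split
      · simp
      · rw [ih]; simp

def pShrink (buf : List String) (ov : Int) : Nat → Int → List String
  | 0, _ => buf
  | k + 1, acc =>
      let acc2 := acc + PySem.Str.len (PySem.List.pyGetD buf (k : Int) "") + 1
      if acc2 ≥ ov ∨ k = 0 then PySem.List.slice buf (some (k : Int)) none
      else pShrink buf ov k acc2

theorem pShrink_eq (buf : List String) (ov : Int) : ∀ (k : Nat) (acc : Int), k ≤ buf.length → pShrink buf ov k acc = (fTail ov ((buf.take k).reverse) acc).reverse ++ buf.drop k := by
  intro k
  induction k with
  | zero => intro acc _; simp [pShrink, fTail]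
  | succ k ih =>
      intro acc hk
      have hklt : k < buf.length := by omega
      have htake : buf.take (k + 1) = buf.take k ++ [buf[k]] := by
        rw [List.take_add_one]; simp [List.getElem?_eq_getElem hklt]
      have hget : PySem.List.pyGetD buf (k : Int) "" = buf[k] := by
        simp [PySem.List.pyGetD_natCast, List.getD_eq_getElem?_getD, List.getElem?_eq_getElem hklt]
      have hdrop : buf.drop k = buf[k] :: buf.drop (k + 1) := List.drop_eq_getElem_cons hklt
      simp only [pShrink, htake, List.reverse_append, List.reverse_cons, List.reverse_nil,
        List.nil_append, List.cons_append, fTail, hget]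
      by_cases h1 : acc + PySem.Str.len buf[k] + 1 ≥ ov
      · rw [if_pos (Or.inl h1), if_pos h1, PySem.List.slice_from_natCast]
        rw [hdrop]
        simp
      · by_cases h0 : k = 0
        · subst h0
          rw [if_pos (Or.inr rfl), PySem.List.slice_from_natCast, if_neg h1]
          simp only [List.take_zero, List.reverse_nil, fTail]
          rw [hdrop]
          simp
        · rw [if_neg (by tauto), if_neg h1, ih _ (by omega)]
          rw [hdrop]
          simp [List.append_assoc]

theorem tail_eq (buf : List String) (ov : Int) : (aTailLoop ov buf.reverse 0 []).reverse = pShrink buf ov buf.length 0 := by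
  rw [aTailLoop_eq, pShrink_eq buf ov buf.length 0 le_rfl]
  simp

def pOverlapTail (buf : List String) (ov : Int) : List String :=
  if ov ≤ 0 ∨ buf.length ≤ 1 then []
  else if PySem.Str.len (PySem.Str.strip (PySem.Str.join "\n" buf)) > ov then
    pShrink buf ov buf.length 0
  else
    PySem.List.slice buf (some (-((max 1 (buf.length / 4) : Nat) : Int))) none

theorem overlapTail_eq (buf : List String) (ov : Int) :
    (if ov > 0 ∧ 1 < buf.length then
      (if PySem.Str.len (PySem.Str.strip (PySem.Str.join "\n" buf)) > ov then
        (aTailLoop ov buf.reverse 0 []).reverse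
      else PySem.List.slice buf (some (-((max 1 (buf.length / 4) : Nat) : Int))) none)
    else []) = pOverlapTail buf ov := by
  unfold pOverlapTail
  by_cases h : ov > 0 ∧ 1 < buf.length
  · have hn : ¬ (ov ≤ 0 ∨ buf.length ≤ 1) := by omega
    rw [if_pos h, if_neg hn]
    by_cases h2 : PySem.Str.len (PySem.Str.strip (PySem.Str.join "\n" buf)) > ov
    · rw [if_pos h2, if_pos h2, tail_eq]
    · rw [if_neg h2, if_neg h2]
  · have hn : ov ≤ 0 ∨ buf.length ≤ 1 := by omega
    rw [if_neg h, if_pos hn]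

theorem flushA_eq_bEmit (o : List (List (String × String))) (b : List String) (h : String) : flushA o b h = bEmit o b h := by
  cases b with
  | nil =>
      have hj : PySem.Str.strip (PySem.Str.join "\n" ([] : List String)) = "" := by decide
      simp [flushA, bEmit, hj]
  | cons x xs => simp [flushA, bEmit]

theorem bEmit_prefix (o : List (List (String × String))) (b : List String) (h : String) : bEmit o b h = o ++ bEmit [] b h := by
  unfold bEmit
  by_cases he : PySem.Str.strip (PySem.Str.join "\n" b) = ""
  · simp [he]
  · simp [he]

def pChunkStep (mc ov : Int) (h : String) (st : List (List (String × String)) × List String × Int) (ln : String) : List (List (String × String)) × List String × Int :=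
  let buf := st.2.1 ++ [ln]
  let size := st.2.2 + PySem.Str.len ln + 1
  if size ≥ mc then
    let out := bEmit st.1 buf h
    let buf2 := pOverlapTail buf ov
    (out, buf2, (buf2.map (fun l => PySem.Str.len l + 1)).sum)
  else (st.1, buf, size)

def dProc (mc ov : Int) : List String → String → List String → Int → List (List (String × String))
  | [], h, b, _ => bEmit [] b h
  | ln :: rest, h, b, s =>
      if bIsHeading ln then bEmit [] b h ++ dProc mc ov rest (bTitleOf h ln) [] 0
      else
        let st := pChunkStep mc ov h ([], b, s) ln
        st.1 ++ dProc mc ov rest h st.2.1 st.2.2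

theorem A_eq_D (mc ov : Int) : ∀ (lines : List String) (o : List (List (String × String))) (b : List String) (s : Int) (h : String),
    (fun st => flushA st.1 st.2.1 st.2.2.2) (lines.foldl (aStep mc ov) (o, b, s, h)) = o ++ dProc mc ov lines h b s := by
  intro lines
  induction lines with
  | nil =>
      intro o b s h
      simp only [List.foldl_nil, dProc]
      exact (flushA_eq_bEmit o b h).trans (bEmit_prefix o b h)
  | cons ln rest ih =>
      intro o b s h
      rw [List.foldl_cons]
      by_cases hh : bIsHeading ln
      · have hstep : aStep mc ov (o, b, s, h) ln = (o ++ bEmit [] b h, [], 0, bTitleOf h ln) := by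
          unfold aStep
          rw [if_pos (by simpa [bIsHeading] using hh)]
          simp only [bTitleOf]
          by_cases hb : b.isEmpty
          · have hbnil : b = [] := List.isEmpty_iff.mp hb
            have hj : PySem.Str.strip (PySem.Str.join "\n" ([] : List String)) = "" := by decide
            simp [hb, hbnil, bEmit, hj]
          · simp only [hb, Bool.false_eq_true, if_neg, ite_false]
            rw [flushA_eq_bEmit, bEmit_prefix o b h]
        rw [hstep, ih]
        simp [dProc, hh]
      · have hstep : aStep mc ov (o, b, s, h) ln =
            (o ++ (pChunkStep mc ov h ([], b, s) ln).1, (pChunkStep mc ov h ([], b, s) ln).2.1, (pChunkStep mc ov h ([], b, s) ln).2.2, h) := by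
          unfold aStep pChunkStep
          rw [if_neg (by simpa [bIsHeading] using hh)]
          by_cases hc : s + PySem.Str.len ln + 1 ≥ mc
          · simp only [ge_iff_le, PySem.Str.len_eq, String.length_toList] at hc
            simp [hc, flushA_eq_bEmit, bEmit_prefix o, ← overlapTail_eq (b ++ [ln]) ov]
          · simp only [ge_iff_le, PySem.Str.len_eq, String.length_toList] at hc
            simp [hc]
        rw [hstep, ih]
        simp [dProc, hh, List.append_assoc]

def chunkFrom (mc ov : Int) (h : String) : List String → List String → Int → List (List (String × String))
  | [], b, _ => bEmit [] b h
  | ln :: rest, b, s =>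
      let st := pChunkStep mc ov h ([], b, s) ln
      st.1 ++ chunkFrom mc ov h rest st.2.1 st.2.2

def segFrom : List String → String → List String → List (String × List String)
  | [], h, cur => [(h, cur)]
  | ln :: rest, h, cur =>
      if bIsHeading ln then (h, cur) :: segFrom rest (bTitleOf h ln) []
      else segFrom rest h (cur ++ [ln])

theorem segFold_eq : ∀ (lines : List String) (segs : List (String × List String)) (h : String) (cur : List String),
    (fun st => st.1 ++ [(st.2.1, st.2.2)]) (lines.foldl bSegStep (segs, h, cur)) = segs ++ segFrom lines h cur := by
  intro lines
  induction lines with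
  | nil => intro segs h cur; simp [segFrom]
  | cons ln rest ih =>
      intro segs h cur
      rw [List.foldl_cons]
      by_cases hh : bIsHeading ln
      · have hstep : bSegStep (segs, h, cur) ln = (segs ++ [(h, cur)], bTitleOf h ln, []) := by
          simp [bSegStep, bTitleOf, hh]
        rw [hstep, ih]
        simp [segFrom, hh]
      · have hstep : bSegStep (segs, h, cur) ln = (segs, h, cur ++ [ln]) := by
          simp [bSegStep, hh]
        rw [hstep, ih]
        simp [segFrom, hh]

def segRest : List String → String → List (String × List String)
  | [], _ => []
  | ln :: rest, h =>
      if bIsHeading ln then segFrom rest (bTitleOf h ln) []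
      else segRest rest h

theorem segFrom_split : ∀ (lines : List String) (h : String) (cur : List String),
    segFrom lines h cur = (h, cur ++ lines.takeWhile (fun l => !bIsHeading l)) :: segRest lines h := by
  intro lines
  induction lines with
  | nil => intro h cur; simp [segFrom, segRest]
  | cons ln rest ih =>
      intro h cur
      by_cases hh : bIsHeading ln
      · simp [segFrom, segRest, hh, List.takeWhile_cons]
      · rw [show segFrom (ln :: rest) h cur = segFrom rest h (cur ++ [ln]) from by simp [segFrom, hh], ih]
        simp [segRest, hh, List.takeWhile_cons]

theorem D_eq_seg (mc ov : Int) : ∀ (lines : List String) (h : String) (b : List String) (s : Int),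
    dProc mc ov lines h b s = chunkFrom mc ov h (lines.takeWhile (fun l => !bIsHeading l)) b s ++ (segRest lines h).flatMap (fun hs => chunkFrom mc ov hs.1 hs.2 [] 0) := by
  intro lines
  induction lines with
  | nil => intro h b s; simp [dProc, segRest, chunkFrom]
  | cons ln rest ih =>
      intro h b s
      by_cases hh : bIsHeading ln
      · rw [show dProc mc ov (ln :: rest) h b s = bEmit [] b h ++ dProc mc ov rest (bTitleOf h ln) [] 0 from by simp [dProc, hh]]
        rw [ih]
        rw [show List.takeWhile (fun l => !bIsHeading l) (ln :: rest) = [] from by simp [List.takeWhile_cons, hh]]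
        rw [show segRest (ln :: rest) h = segFrom rest (bTitleOf h ln) [] from by simp [segRest, hh]]
        rw [segFrom_split rest (bTitleOf h ln) []]
        simp [chunkFrom, List.append_assoc]
      · rw [show dProc mc ov (ln :: rest) h b s = (pChunkStep mc ov h ([], b, s) ln).1 ++ dProc mc ov rest h (pChunkStep mc ov h ([], b, s) ln).2.1 (pChunkStep mc ov h ([], b, s) ln).2.2 from by simp [dProc, hh]]
        rw [ih]
        rw [show List.takeWhile (fun l => !bIsHeading l) (ln :: rest) = ln :: List.takeWhile (fun l => !bIsHeading l) rest from by simp [List.takeWhile_cons, hh]]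
        rw [show segRest (ln :: rest) h = segRest rest h from by simp [segRest, hh]]
        simp [chunkFrom, List.append_assoc]

-- ---- B-side: prefix sums ----

def sigL (L : List String) (j : Nat) : Int := ((L.take j).map (fun l => PySem.Str.len l + 1)).sum

theorem sigL_add (L : List String) (i j : Nat) (hij : i ≤ j) :
    sigL L j = sigL L i + (((L.drop i).take (j - i)).map (fun l => PySem.Str.len l + 1)).sum := by
  have h : L.take j = L.take i ++ (L.drop i).take (j - i) := by
    rw [show j = i + (j - i) by omega, List.take_add]
    simp
  simp [sigL, h]

theorem sigL_mono (L : List String) (i j : Nat) (hij : i ≤ j) : sigL L i ≤ sigL L j := by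
  rw [sigL_add L i j hij]
  have : 0 ≤ (((L.drop i).take (j - i)).map (fun l => PySem.Str.len l + 1)).sum := by
    apply List.sum_nonneg
    intro x hx
    simp only [List.mem_map] at hx
    obtain ⟨l, _, rfl⟩ := hx
    simp [PySem.Str.len_eq]
    positivity
  omega

theorem sigL_succ (L : List String) (j : Nat) (hj : j < L.length) :
    sigL L (j + 1) = sigL L j + (PySem.Str.len L[j] + 1) := by
  unfold sigL
  rw [show L.take (j + 1) = L.take j ++ [L[j]] from by rw [List.take_add_one]; simp [List.getElem?_eq_getElem hj]]
  simp only [List.map_append, List.sum_append, List.map_cons, List.map_nil, List.sum_cons, List.sum_nil]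
  ring

def prefList (c : Int) : List String → List Int
  | [] => [c]
  | x :: xs => c :: prefList (c + PySem.Str.len x + 1) xs

theorem foldPref : ∀ (Lst : List String) (acc : List Int) (c : Int),
    Lst.foldl (fun P ln => P ++ [PySem.List.pyGetD P (-1) 0 + PySem.Str.len ln + 1]) (acc ++ [c]) = acc ++ prefList c Lst := by
  intro Lst
  induction Lst with
  | nil => intro acc c; simp [prefList]
  | cons x xs ih =>
      intro acc c
      rw [List.foldl_cons]
      have hg : PySem.List.pyGetD (acc ++ [c]) (-1) 0 = c := PySem.List.pyGetD_neg_one_append_singleton ..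
      rw [hg, show (acc ++ [c]) ++ [c + PySem.Str.len x + 1] = (acc ++ [c]) ++ [c + PySem.Str.len x + 1] from rfl, ih]
      simp [prefList]

theorem bPrefix_eq (L : List String) : bPrefix L = prefList 0 L := by
  unfold bPrefix
  simpa using foldPref L [] 0

theorem prefList_getD : ∀ (Lst : List String) (c : Int) (j : Nat), j ≤ Lst.length → (prefList c Lst).getD j 0 = c + sigL Lst j := by
  intro Lst
  induction Lst with
  | nil =>
      intro c j hj
      have hj0 : j = 0 := by simpa using hj
      subst hj0
      simp [prefList, sigL]
  | cons x xs ih =>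
      intro c j hj
      cases j with
      | zero => simp [prefList, sigL]
      | succ j =>
          simp only [prefList, List.getD_cons_succ]
          rw [ih _ j (by simpa using hj)]
          simp [sigL, List.take_succ_cons]
          ring

theorem P_getD (L : List String) (j : Nat) (hj : j ≤ L.length) :
    PySem.List.pyGetD (bPrefix L) ((j : Nat) : Int) 0 = sigL L j := by
  rw [PySem.List.pyGetD_natCast, bPrefix_eq, prefList_getD _ _ _ (by simpa [prefList] using (by simpa using hj : j ≤ L.length))]
  · simp

-- ---- B-side: characterisations of the overlap-start searches ----

theorem pShrink_spec (buf : List String) (ov : Int) :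
    ∀ k, 1 ≤ k → k ≤ buf.length →
    (∀ j, k ≤ j → j < buf.length → ¬ (sigL buf buf.length - sigL buf j ≥ ov)) →
    ∃ r, pShrink buf ov k (sigL buf buf.length - sigL buf k) = buf.drop r ∧ r < k ∧
      ((sigL buf buf.length - sigL buf r ≥ ov) ∨ r = 0) ∧
      (∀ j, r < j → j < buf.length → ¬ (sigL buf buf.length - sigL buf j ≥ ov)) := by
  intro k
  induction k with
  | zero => intro h1; omega
  | succ k ih =>
      intro _ hk hup
      have hklt : k < buf.length := by omega
      have hget : PySem.List.pyGetD buf (k : Int) "" = buf[k] := by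
        simp [PySem.List.pyGetD_natCast, List.getD_eq_getElem?_getD, List.getElem?_eq_getElem hklt]
      have hsucc := sigL_succ buf k hklt
      have hacc2 : sigL buf buf.length - sigL buf (k + 1) + PySem.Str.len buf[k] + 1 = sigL buf buf.length - sigL buf k := by linarith
      simp only [pShrink, hget, hacc2]
      by_cases hc : sigL buf buf.length - sigL buf k ≥ ov ∨ k = 0
      · rw [if_pos hc, PySem.List.slice_from_natCast]
        refine ⟨k, rfl, by omega, hc, ?_⟩
        intro j hj1 hj2
        exact hup j (by omega) hj2
      · rw [if_neg hc]
        push_neg at hc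
        obtain ⟨hc1, hc2⟩ := hc
        obtain ⟨r, hr⟩ := ih (by omega) (by omega) (by
          intro j hj1 hj2
          rcases Nat.eq_or_lt_of_le hj1 with h | h
          · subst h; omega
          · exact hup j (by omega) hj2)
        exact ⟨r, hr.1, by omega, hr.2.2⟩

theorem bSearchGo_spec (P : List Int) (e : Nat) (ov : Int) :
    ∀ (fuel lo hi : Nat), hi - lo ≤ fuel → lo < hi →
    (PySem.List.pyGetD P (e : Int) 0 - PySem.List.pyGetD P (lo : Int) 0 ≥ ov) →
    ¬ (PySem.List.pyGetD P (e : Int) 0 - PySem.List.pyGetD P (hi : Int) 0 ≥ ov) →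
    lo ≤ bSearchGo P e ov fuel lo hi ∧ bSearchGo P e ov fuel lo hi < hi ∧
    (PySem.List.pyGetD P (e : Int) 0 - PySem.List.pyGetD P ((bSearchGo P e ov fuel lo hi : Nat) : Int) 0 ≥ ov) ∧
    ¬ (PySem.List.pyGetD P (e : Int) 0 - PySem.List.pyGetD P (((bSearchGo P e ov fuel lo hi + 1 : Nat)) : Int) 0 ≥ ov) := by
  intro fuel
  induction fuel with
  | zero => intro lo hi h1 h2; omega
  | succ fuel ih =>
      intro lo hi hf hlt hlo hhi
      simp only [bSearchGo]
      by_cases hgap : hi - lo > 1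
      · rw [if_pos hgap]
        have hmid1 : lo < (lo + hi) / 2 := by omega
        have hmid2 : (lo + hi) / 2 < hi := by omega
        by_cases hc : PySem.List.pyGetD P (e : Int) 0 - PySem.List.pyGetD P (((lo + hi) / 2 : Nat) : Int) 0 ≥ ov
        · rw [if_pos hc]
          have := ih ((lo + hi) / 2) hi (by omega) hmid2 hc hhi
          exact ⟨by omega, this.2.1, this.2.2⟩
        · rw [if_neg hc]
          have := ih lo ((lo + hi) / 2) (by omega) hmid1 hlo hc
          exact ⟨this.1, by omega, this.2.2⟩
      · rw [if_neg hgap]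
        have hhi' : hi = lo + 1 := by omega
        subst hhi'
        exact ⟨le_rfl, by omega, hlo, by exact_mod_cast hhi⟩

theorem bSearch_spec (P : List Int) (e : Nat) (ov : Int) (lo hi : Nat) (hlt : lo < hi)
    (hlo : PySem.List.pyGetD P (e : Int) 0 - PySem.List.pyGetD P (lo : Int) 0 ≥ ov)
    (hhi : ¬ (PySem.List.pyGetD P (e : Int) 0 - PySem.List.pyGetD P (hi : Int) 0 ≥ ov)) :
    lo ≤ bSearch P e ov lo hi ∧ bSearch P e ov lo hi < hi ∧
    (PySem.List.pyGetD P (e : Int) 0 - PySem.List.pyGetD P ((bSearch P e ov lo hi : Nat) : Int) 0 ≥ ov) ∧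
    ¬ (PySem.List.pyGetD P (e : Int) 0 - PySem.List.pyGetD P (((bSearch P e ov lo hi + 1 : Nat)) : Int) 0 ≥ ov) := by
  unfold bSearch
  exact bSearchGo_spec P e ov (hi - lo) lo hi le_rfl hlt hlo hhi

theorem cand_uniq (m : Nat) (C : Nat → Prop)
    (r1 r2 : Nat) (h1 : r1 < m) (h2 : r2 < m)
    (c1 : C r1 ∨ r1 = 0) (u1 : ∀ j, r1 < j → j < m → ¬ C j)
    (c2 : C r2 ∨ r2 = 0) (u2 : ∀ j, r2 < j → j < m → ¬ C j) : r1 = r2 := by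
  rcases Nat.lt_trichotomy r1 r2 with h | h | h
  · exfalso
    rcases c2 with hc | hc
    · exact u1 r2 h h2 hc
    · omega
  · exact h
  · exfalso
    rcases c1 with hc | hc
    · exact u2 r1 h h1 hc
    · omega

-- ---- buffer-as-slice lemmas ----

theorem bufLen (L : List String) (s e : Nat) (hs : s ≤ e) (he : e ≤ L.length) :
    ((L.drop s).take (e - s)).length = e - s := by
  simp [List.length_take, List.length_drop]
  omega

theorem bufTake (L : List String) (s e j : Nat) (hj : j ≤ e - s) :
    ((L.drop s).take (e - s)).take j = (L.drop s).take j := by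
  rw [List.take_take]
  congr 1
  omega

theorem sigBuf (L : List String) (s e j : Nat) (hs : s ≤ e) (hj : j ≤ e - s) :
    sigL ((L.drop s).take (e - s)) j = sigL L (s + j) - sigL L s := by
  have h1 := sigL_add L s (s + j) (by omega)
  simp only [show s + j - s = j by omega] at h1
  unfold sigL
  rw [bufTake L s e j hj]
  unfold sigL at h1
  linarith

theorem bufDrop (L : List String) (s s' e : Nat) (hss : s ≤ s') (hse : s' ≤ e) :
    ((L.drop s).take (e - s)).drop (s' - s) = (L.drop s').take (e - s') := by
  rw [List.drop_take, List.drop_drop,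
    show e - s - (s' - s) = e - s' by omega, show s + (s' - s) = s' by omega]

theorem bufAppend (L : List String) (s e : Nat) (hs : s ≤ e) (he : e < L.length) :
    (L.drop s).take (e - s) ++ [L[e]] = (L.drop s).take (e + 1 - s) := by
  have hlen : e - s < (L.drop s).length := by
    simp [List.length_drop]
    omega
  have hget : (L.drop s)[e - s]'hlen = L[e] := by
    rw [List.getElem_drop]
    congr 1
    omega
  rw [show e + 1 - s = (e - s) + 1 by omega, List.take_add_one, List.getElem?_eq_getElem hlen]
  simp [hget]

-- ---- the two overlap-start computations agree ----

theorem tailStart_match (L : List String) (ov : Int) (s E : Nat) (hE : E ≤ L.length) (hm : s + 1 < E) :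
    s ≤ bTailStart (bPrefix L) s E ov ∧ bTailStart (bPrefix L) s E ov < E ∧
    pShrink ((L.drop s).take (E - s)) ov ((L.drop s).take (E - s)).length 0
      = (L.drop (bTailStart (bPrefix L) s E ov)).take (E - bTailStart (bPrefix L) s E ov) := by
  have hbl : ((L.drop s).take (E - s)).length = E - s := bufLen L s E (by omega) hE
  have hCl : ∀ j, j ≤ E - s →
      (sigL ((L.drop s).take (E - s)) ((L.drop s).take (E - s)).length - sigL ((L.drop s).take (E - s)) j
        = sigL L E - sigL L (s + j)) := by
    intro j hj
    rw [hbl, sigBuf L s E j (by omega) hj, sigBuf L s E (E - s) (by omega) le_rfl,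
        show s + (E - s) = E by omega]
    ring
  have hzero : sigL ((L.drop s).take (E - s)) ((L.drop s).take (E - s)).length
      - sigL ((L.drop s).take (E - s)) ((L.drop s).take (E - s)).length = 0 := by ring
  obtain ⟨r, hrdrop, hrlt, hrprop, hrup⟩ :=
    pShrink_spec ((L.drop s).take (E - s)) ov ((L.drop s).take (E - s)).length
      (by omega) le_rfl (by intro j hj1 hj2; omega)
  rw [hzero] at hrdrop
  rw [hbl] at hrlt
  have hrC : (sigL L E - sigL L (s + r) ≥ ov) ∨ r = 0 := by
    rcases hrprop with h | h
    · left; rw [hCl r (by omega)] at h; exact h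
    · right; exact h
  have hrU : ∀ j, r < j → j < E - s → ¬ (sigL L E - sigL L (s + j) ≥ ov) := by
    intro j hj1 hj2 hcon
    exact hrup j hj1 (by omega) (by rw [hCl j (by omega)]; exact hcon)
  have hPE := P_getD L E hE
  have hPE1 := P_getD L (E - 1) (by omega)
  have hPs := P_getD L s (by omega)
  unfold bTailStart
  by_cases h1 : PySem.List.pyGetD (bPrefix L) (E : Int) 0 - PySem.List.pyGetD (bPrefix L) ((E - 1 : Nat) : Int) 0 ≥ ov
  · rw [if_pos h1]
    have hc : sigL L E - sigL L (E - 1) ≥ ov := by rw [hPE, hPE1] at h1; exact h1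
    have hr : r = E - 1 - s := by
      refine cand_uniq (E - s) (fun j => sigL L E - sigL L (s + j) ≥ ov) r (E - 1 - s)
        hrlt (by omega) hrC hrU (Or.inl (by show sigL L E - sigL L (s + (E - 1 - s)) ≥ ov; rw [show s + (E - 1 - s) = E - 1 by omega]; exact hc))
        (by intro j hj1 hj2; omega)
    refine ⟨by omega, by omega, ?_⟩
    rw [hrdrop, hr, show E - 1 - s = (E - 1) - s from rfl, bufDrop L s (E - 1) E (by omega) (by omega)]
  · rw [if_neg h1]
    by_cases h2 : PySem.List.pyGetD (bPrefix L) (E : Int) 0 - PySem.List.pyGetD (bPrefix L) (s : Int) 0 < ov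
    · rw [if_pos h2]
      have hnc0 : ¬ (sigL L E - sigL L s ≥ ov) := by rw [hPE, hPs] at h2; omega
      have hr : r = 0 := by
        refine cand_uniq (E - s) (fun j => sigL L E - sigL L (s + j) ≥ ov) r 0
          hrlt (by omega) hrC hrU (Or.inr rfl) ?_
        intro j hj1 hj2 hcon
        have hmono := sigL_mono L s (s + j) (by omega)
        exact hnc0 (by omega)
      refine ⟨le_rfl, by omega, ?_⟩
      rw [hrdrop, hr]
      simp
    · rw [if_neg h2]
      have hc0 : PySem.List.pyGetD (bPrefix L) (E : Int) 0 - PySem.List.pyGetD (bPrefix L) (s : Int) 0 ≥ ov := by omega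
      obtain ⟨hb1, hb2, hb3, hb4⟩ :=
        bSearch_spec (bPrefix L) E ov s (E - 1) (by omega) hc0 h1
      set rB := bSearch (bPrefix L) E ov s (E - 1) with hrB
      have hPrB := P_getD L rB (by omega)
      have hPrB1 := P_getD L (rB + 1) (by omega)
      have hCrB : sigL L E - sigL L rB ≥ ov := by rw [hPE, hPrB] at hb3; exact hb3
      have hNCrB1 : ¬ (sigL L E - sigL L (rB + 1) ≥ ov) := by rw [hPE, hPrB1] at hb4; exact hb4
      have hr : r = rB - s := by
        refine cand_uniq (E - s) (fun j => sigL L E - sigL L (s + j) ≥ ov) r (rB - s)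
          hrlt (by omega) hrC hrU (Or.inl (by show sigL L E - sigL L (s + (rB - s)) ≥ ov; rw [show s + (rB - s) = rB by omega]; exact hCrB)) ?_
        intro j hj1 hj2 hcon
        have hmono := sigL_mono L (rB + 1) (s + j) (by omega)
        exact hNCrB1 (by omega)
      refine ⟨by omega, by omega, ?_⟩
      rw [hrdrop, hr, bufDrop L s rB E (by omega) (by omega)]

-- ---- the index-based chunker equals the per-line chunker ----

theorem idx_inv (mc ov : Int) (h : String) (L : List String) :
    ∀ (cnt e s : Nat) (out : List (List (String × String))),
      e ≤ L.length → s ≤ e → cnt = L.length - e →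
      (fun st => bEmit st.1 (PySem.List.slice L (some ((st.2 : Nat) : Int)) (some ((L.length : Nat) : Int))) h)
        ((List.range' (e + 1) cnt).foldl (bChunkStep2 mc ov L (bPrefix L) h) (out, s))
      = out ++ chunkFrom mc ov h (L.drop e) ((L.drop s).take (e - s)) (sigL L e - sigL L s) := by
  intro cnt
  induction cnt with
  | zero =>
      intro e s out he hs hcnt
      have hen : e = L.length := by omega
      subst hen
      simp only [List.range'_zero, List.foldl_nil, List.drop_length, chunkFrom]
      rw [PySem.List.slice_natCast, bEmit_prefix]
  | succ cnt ih =>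
      intro e s out he hs hcnt
      have helt : e < L.length := by omega
      have hdropE : L.drop e = L[e] :: L.drop (e + 1) := List.drop_eq_getElem_cons helt
      have hbuf2 : (L.drop s).take (e - s) ++ [L[e]] = (L.drop s).take (e + 1 - s) :=
        bufAppend L s e hs helt
      have hsz2 : sigL L e - sigL L s + PySem.Str.len L[e] + 1 = sigL L (e + 1) - sigL L s := by
        have := sigL_succ L e helt
        linarith
      have hPe1 := P_getD L (e + 1) (by omega)
      have hPs := P_getD L s (by omega)
      have hslice : PySem.List.slice L (some ((s : Nat) : Int)) (some (((e + 1 : Nat)) : Int)) = (L.drop s).take (e + 1 - s) :=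
        PySem.List.slice_natCast ..
      rw [List.range'_succ, List.foldl_cons]
      rw [hdropE]
      simp only [chunkFrom, pChunkStep]
      by_cases hT : sigL L (e + 1) - sigL L s ≥ mc
      · -- flush
        have hTb : PySem.List.pyGetD (bPrefix L) (((e + 1 : Nat)) : Int) 0 - PySem.List.pyGetD (bPrefix L) ((s : Nat) : Int) 0 ≥ mc := by
          rw [hPe1, hPs]; exact hT
        have hstep : bChunkStep2 mc ov L (bPrefix L) h (out, s) (e + 1) =
            (bEmit out ((L.drop s).take (e + 1 - s)) h,
             if ov > 0 ∧ (e + 1) - s > 1 then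
               if PySem.Str.len (PySem.Str.strip (PySem.Str.join "\n" ((L.drop s).take (e + 1 - s)))) > ov then
                 bTailStart (bPrefix L) s (e + 1) ov
               else (e + 1) - max 1 (((e + 1) - s) / 4)
             else e + 1) := by
          simp only [bChunkStep2, hslice]
          rw [if_pos hTb]
        rw [hstep]
        rw [if_pos (show sigL L e - sigL L s + PySem.Str.len L[e] + 1 ≥ mc by rw [hsz2]; exact hT)]
        rw [hbuf2]
        set s' :=
          (if ov > 0 ∧ e + 1 - s > 1 then
            if PySem.Str.len (PySem.Str.strip (PySem.Str.join "\n" (List.take (e + 1 - s) (List.drop s L)))) > ov then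
              bTailStart (bPrefix L) s (e + 1) ov
            else e + 1 - max 1 ((e + 1 - s) / 4)
          else e + 1) with hs'def
        have hbl : ((L.drop s).take (e + 1 - s)).length = e + 1 - s := bufLen L s (e + 1) (by omega) (by omega)
        have hmain : (s ≤ s' ∧ s' ≤ e + 1) ∧
            pOverlapTail ((L.drop s).take (e + 1 - s)) ov = (L.drop s').take (e + 1 - s') := by
          by_cases hOv : ov > 0 ∧ e + 1 - s > 1
          · rw [hs'def, if_pos hOv]
            have hno : ¬ (ov ≤ 0 ∨ ((L.drop s).take (e + 1 - s)).length ≤ 1) := by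
              rw [hbl]; omega
            by_cases hGuard : PySem.Str.len (PySem.Str.strip (PySem.Str.join "\n" (List.take (e + 1 - s) (List.drop s L)))) > ov
            · rw [if_pos hGuard]
              obtain ⟨ht1, ht2, ht3⟩ := tailStart_match L ov s (e + 1) (by omega) (by omega)
              refine ⟨⟨ht1, by omega⟩, ?_⟩
              unfold pOverlapTail
              rw [if_neg hno, if_pos hGuard]
              exact ht3
            · rw [if_neg hGuard]
              have hd4 : (e + 1 - s) / 4 ≤ e + 1 - s := Nat.div_le_self _ _
              have hm1 : max 1 ((e + 1 - s) / 4) ≤ e + 1 - s := by omega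
              refine ⟨⟨by omega, by omega⟩, ?_⟩
              unfold pOverlapTail
              rw [if_neg hno, if_neg hGuard, hbl]
              rw [PySem.List.slice_from_neg_natCast _ _ (by omega), hbl]
              rw [show (e + 1 - s) - max 1 ((e + 1 - s) / 4) = (s + ((e + 1 - s) - max 1 ((e + 1 - s) / 4))) - s by omega]
              rw [bufDrop L s (s + ((e + 1 - s) - max 1 ((e + 1 - s) / 4))) (e + 1) (by omega) (by omega)]
              congr 2 <;> omega
          · rw [hs'def, if_neg hOv]
            have hyes : ov ≤ 0 ∨ ((L.drop s).take (e + 1 - s)).length ≤ 1 := by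
              rw [hbl]; omega
            refine ⟨⟨by omega, le_rfl⟩, ?_⟩
            unfold pOverlapTail
            rw [if_pos hyes]
            simp
        obtain ⟨⟨hs1, hs2⟩, hOT⟩ := hmain
        have hsum : (((L.drop s').take (e + 1 - s')).map (fun l => PySem.Str.len l + 1)).sum = sigL L (e + 1) - sigL L s' := by
          have := sigL_add L s' (e + 1) hs2
          linarith
        rw [hOT, hsum]
        have hih := ih (e + 1) s' (bEmit out ((L.drop s).take (e + 1 - s)) h) (by omega) hs2 (by omega)
        simp only [] at hih
        rw [hih, bEmit_prefix out]
        simp [List.append_assoc]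
      · -- no flush
        have hTb : ¬ (PySem.List.pyGetD (bPrefix L) (((e + 1 : Nat)) : Int) 0 - PySem.List.pyGetD (bPrefix L) ((s : Nat) : Int) 0 ≥ mc) := by
          rw [hPe1, hPs]; exact hT
        have hstep : bChunkStep2 mc ov L (bPrefix L) h (out, s) (e + 1) = (out, s) := by
          simp only [bChunkStep2]
          rw [if_neg hTb]
        rw [hstep]
        rw [if_neg (by rw [hsz2]; exact hT)]
        simp only [List.nil_append]
        rw [hbuf2, hsz2]
        have hih := ih (e + 1) s out (by omega) (by omega) (by omega)
        simp only [] at hih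
        exact hih

theorem chunkSection_closed (mc ov : Int) (h : String) (L : List String) (out : List (List (String × String))) :
    bChunkSection mc ov out L h = out ++ chunkFrom mc ov h L [] 0 := by
  have hih := idx_inv mc ov h L L.length 0 0 out (by omega) le_rfl (by omega)
  unfold bChunkSection
  simpa [sigL] using hih

theorem foldSections (mc ov : Int) : ∀ (secs : List (String × List String)) (acc : List (List (String × String))),
    secs.foldl (fun a hs => bChunkSection mc ov a hs.2 hs.1) acc = acc ++ secs.flatMap (fun hs => chunkFrom mc ov hs.1 hs.2 [] 0) := by
  intro secs
  induction secs with
  | nil => intro acc; simp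
  | cons x rest ih =>
      intro acc
      rw [List.foldl_cons, chunkSection_closed, ih]
      simp [List.append_assoc]

-- ===== VERDICT (by name: the statement is the Claim_ definition above) =====
theorem split_heading_chunks_py_spec : Claim_equal_split_heading_chunks_py := by
  unfold Claim_equal_split_heading_chunks_py
  intro text mc ov _
  unfold Spec_split_heading_chunks_py
  unfold split_heading_chunks_py split_heading_chunks_py_alt
  by_cases ht : text = ""
  · simp [ht]
  · simp only [if_neg ht]
    have hA := A_eq_D mc ov (PySem.Str.splitlines text) [] [] 0 ""
    have hB := segFold_eq (PySem.Str.splitlines text) [] "" []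
    simp only [List.nil_append] at hA hB
    rw [hA, hB, foldSections, segFrom_split, D_eq_seg]
    rw [List.flatMap_cons]
    simp
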